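-- pv_equiv track=rewrite | github.com/DelfiSpace/PQ9-COMMS-Testing-Tool | AX25_Encoder.py | DeStuffBits
-- ===== SOURCE A (Python) =====
-- def DeStuffBits(bits):
--     outputBits = []
--     counter = 0
--     for bit in bits:
--         if bit == 1:
--             outputBits.append(1)
--             counter = counter + 1
--         else:
--             if counter < 5:
--                 outputBits.append(0)
--             counter = 0
--
--     return outputBits
-- ===== SOURCE B (Python) =====
-- def DeStuffBits(bits):
--     # Run-based destuffing: walk maximal runs of equal (normalized) bits.
--     # A ones-run of length k is emitted as-is; a zeros-run loses its first
--     # zero exactly when the immediately preceding ones-run had length >= 5.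
--     out = []
--     prev_ones = 0
--     i = 0
--     n = len(bits)
--     while i < n:
--         v = 1 if bits[i] == 1 else 0
--         j = i + 1
--         while j < n and (1 if bits[j] == 1 else 0) == v:
--             j += 1
--         k = j - i
--         if v == 1:
--             out += [1] * k
--             prev_ones = k
--         else:
--             out += [0] * (k - 1 if prev_ones >= 5 else k)
--             prev_ones = 0
--         i = j
--     return out
-- ===== Notes on version B (the rewrite author's own statement) =====
-- stated objective: alternative
-- what changed: B replaces A's per-bit loop with a stuffing counter by a run-length traversal: it splits the input into maximal runs of equal normalized bits and, per zeros-run, drops its first zero iff the preceding ones-run had length >= 5.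
import Mathlib
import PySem

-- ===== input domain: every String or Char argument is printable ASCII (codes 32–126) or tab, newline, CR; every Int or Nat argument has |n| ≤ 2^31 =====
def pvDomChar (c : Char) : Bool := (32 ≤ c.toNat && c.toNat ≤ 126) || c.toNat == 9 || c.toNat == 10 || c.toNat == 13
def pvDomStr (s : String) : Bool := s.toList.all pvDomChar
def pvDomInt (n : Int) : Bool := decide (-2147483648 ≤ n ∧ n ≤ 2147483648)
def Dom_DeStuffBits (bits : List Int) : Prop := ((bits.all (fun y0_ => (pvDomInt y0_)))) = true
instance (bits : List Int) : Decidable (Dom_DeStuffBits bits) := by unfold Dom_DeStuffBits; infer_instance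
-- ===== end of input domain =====

-- B re-implements A's per-bit destuffing loop as a traversal of maximal runs of equal normalized bits (alternative decomposition, same cost).
-- ===== PORT A =====
def DeStuffBits (bits : List Int) : List Int :=
  (bits.foldl (fun (st : List Int × Int) bit =>
      if bit = 1 then (st.1 ++ [1], st.2 + 1)
      else if st.2 < 5 then (st.1 ++ [0], 0) else (st.1, 0))
    ([], 0)).1

-- ===== PORT B =====
-- normalized bit value, as in B's `1 if x == 1 else 0`
def pvNormBit (b : Int) : Int := if b = 1 then 1 else 0

-- inner while loop of B: how many further leading bits of the list normalize to v
def pvRunLen (v : Int) : List Int → Nat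
  | [] => 0
  | b :: r => if pvNormBit b = v then pvRunLen v r + 1 else 0

-- outer while loop of B: the list suffix from index i, carrying prev_ones
def pvDestuffGo : List Int → Nat → List Int
  | [], _ => []
  | b :: r, prev =>
    let v := pvNormBit b
    let k := pvRunLen v r + 1
    if v = 1 then List.replicate k 1 ++ pvDestuffGo (r.drop (k - 1)) k
    else List.replicate (if 5 ≤ prev then k - 1 else k) 0 ++ pvDestuffGo (r.drop (k - 1)) 0
termination_by bits _ => bits.length
decreasing_by all_goals (simp only [List.length_drop, List.length_cons]; omega)

def DeStuffBits_alt (bits : List Int) : List Int := pvDestuffGo bits 0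

-- ===== PRECONDITION & SPEC =====
def Spec_DeStuffBits (bits : List Int) (out : List Int) : Prop := out = DeStuffBits_alt bits
instance (bits : List Int) (out : List Int) : Decidable (Spec_DeStuffBits bits out) := by unfold Spec_DeStuffBits; infer_instance

-- ===== CLAIM (what is proved, stated in full; the proofs are below) =====
def Claim_equal_DeStuffBits : Prop := ∀ (bits : List Int), Dom_DeStuffBits bits → Spec_DeStuffBits bits (DeStuffBits bits)

-- ===== LEMMAS AND PROOFS =====

-- ===== VERDICT (by name: the statement is the Claim_ definition above) =====
-- reference recursion equal to A's loop (proof helper)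
def pvDeStuff : List Int → Int → List Int
  | [], _ => []
  | b :: r, c =>
    if b = 1 then 1 :: pvDeStuff r (c + 1)
    else if c < 5 then 0 :: pvDeStuff r 0 else pvDeStuff r 0

theorem pvFoldA (bits : List Int) : ∀ (acc : List Int) (c : Int),
    (bits.foldl (fun (st : List Int × Int) bit =>
      if bit = 1 then (st.1 ++ [1], st.2 + 1)
      else if st.2 < 5 then (st.1 ++ [0], 0) else (st.1, 0))
      (acc, c)).1 = acc ++ pvDeStuff bits c := by
  induction bits with
  | nil => simp [pvDeStuff]
  | cons b r ih =>
    intro acc c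
    simp only [List.foldl_cons, pvDeStuff]
    split_ifs with h1 h2 <;> simp [ih]

theorem pvOnesRun (r : List Int) : ∀ (c : Int),
    pvDeStuff r c =
      List.replicate (pvRunLen 1 r) 1 ++ pvDeStuff (r.drop (pvRunLen 1 r)) (c + pvRunLen 1 r) := by
  induction r with
  | nil => simp [pvDeStuff, pvRunLen]
  | cons b t ih =>
    intro c
    by_cases hb : b = 1
    · subst hb
      have hr : pvRunLen 1 (1 :: t) = pvRunLen 1 t + 1 := by
        simp [pvRunLen, pvNormBit]
      rw [hr, List.replicate_succ, List.drop_succ_cons]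
      show 1 :: pvDeStuff t (c + 1) = _
      rw [ih (c + 1)]
      simp only [List.cons_append]
      congr 2
      push_cast; ring_nf
    · have hr : pvRunLen 1 (b :: t) = 0 := by
        simp [pvRunLen, pvNormBit, hb]
      rw [hr]; simp

theorem pvZerosRun (r : List Int) :
    pvDeStuff r 0 =
      List.replicate (pvRunLen 0 r) 0 ++ pvDeStuff (r.drop (pvRunLen 0 r)) 0 := by
  induction r with
  | nil => simp [pvDeStuff, pvRunLen]
  | cons b t ih =>
    by_cases hb : b = 1
    · have hr : pvRunLen 0 (b :: t) = 0 := by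
        simp [pvRunLen, pvNormBit, hb]
      rw [hr]; simp
    · have hr : pvRunLen 0 (b :: t) = pvRunLen 0 t + 1 := by
        simp [pvRunLen, pvNormBit, hb]
      rw [hr, List.replicate_succ, List.drop_succ_cons]
      show (if b = 1 then _ else if (0:Int) < 5 then 0 :: pvDeStuff t 0 else pvDeStuff t 0) = _
      rw [if_neg hb, if_pos (by norm_num), ih]
      simp

theorem pvRunMax1 (r : List Int) :
    ∀ b, (r.drop (pvRunLen 1 r)).head? = some b → b ≠ 1 := by
  induction r with
  | nil => simp
  | cons x t ih =>
    by_cases hx : x = 1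
    · have hr : pvRunLen 1 (x :: t) = pvRunLen 1 t + 1 := by
        simp [pvRunLen, pvNormBit, hx]
      rw [hr, List.drop_succ_cons]; exact ih
    · have hr : pvRunLen 1 (x :: t) = 0 := by
        simp [pvRunLen, pvNormBit, hx]
      rw [hr]
      simp only [List.drop_zero, List.head?_cons, Option.some.injEq]
      rintro b rfl; exact hx

theorem pvMain (n : Nat) : ∀ (bits : List Int), bits.length ≤ n → ∀ (p : Nat),
    (∀ b, bits.head? = some b → b = 1 → p = 0) →
    pvDestuffGo bits p = pvDeStuff bits (p : Int) := by
  induction n with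
  | zero =>
    intro bits hlen p _
    have : bits = [] := List.eq_nil_of_length_eq_zero (Nat.le_zero.mp hlen)
    subst this; simp [pvDestuffGo, pvDeStuff]
  | succ n ih =>
    intro bits hlen p hp
    match bits with
    | [] => simp [pvDestuffGo, pvDeStuff]
    | b :: r =>
      by_cases hb : b = 1
      · have hp0 : p = 0 := hp b rfl hb
        subst hp0 hb
        have hn : pvNormBit 1 = 1 := by simp [pvNormBit]
        rw [pvDestuffGo]
        simp only [hn, Nat.add_sub_cancel]
        have hd : (r.drop (pvRunLen 1 r)).length ≤ n := by
          have := List.length_drop (l := r) (i := pvRunLen 1 r)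
          simp at hlen; omega
        rw [ih _ hd (pvRunLen 1 r + 1)
            (fun x hx h1 => absurd h1 (pvRunMax1 r x hx))]
        show _ = pvDeStuff (1 :: r) ((0 : Nat) : Int)
        show List.replicate (pvRunLen 1 r + 1) 1 ++
            pvDeStuff (r.drop (pvRunLen 1 r)) ((pvRunLen 1 r + 1 : Nat) : Int) = _
        show _ = (if (1:Int) = 1 then 1 :: pvDeStuff r (((0:Nat):Int) + 1)
                  else if ((0:Nat):Int) < 5 then 0 :: pvDeStuff r 0 else pvDeStuff r 0)
        rw [if_pos rfl, pvOnesRun r]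
        rw [List.replicate_succ]
        simp only [List.cons_append]
        congr 2
        push_cast; ring_nf
      · have hn : pvNormBit b = 0 := by simp [pvNormBit, hb]
        rw [pvDestuffGo]
        simp only [hn, Nat.add_sub_cancel]
        rw [if_neg (by norm_num)]
        have hd : (r.drop (pvRunLen 0 r)).length ≤ n := by
          have := List.length_drop (l := r) (i := pvRunLen 0 r)
          simp at hlen; omega
        rw [ih _ hd 0 (fun _ _ _ => rfl)]
        show _ = pvDeStuff (b :: r) (p : Int)
        show _ = (if b = 1 then 1 :: pvDeStuff r ((p:Int) + 1)
                  else if (p:Int) < 5 then 0 :: pvDeStuff r 0 else pvDeStuff r 0)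
        rw [if_neg hb, pvZerosRun r]
        by_cases h5 : 5 ≤ p
        · rw [if_pos h5, if_neg (by omega)]
          norm_num
        · rw [if_neg h5, if_pos (by omega), List.replicate_succ]
          simp

-- ===== VERDICT (by name: the statement is the Claim_ definition above) =====
theorem DeStuffBits_spec : Claim_equal_DeStuffBits := by
  intro bits _
  show DeStuffBits bits = DeStuffBits_alt bits
  rw [DeStuffBits, DeStuffBits_alt, pvFoldA bits [] 0,
      pvMain bits.length bits le_rfl 0 (fun _ _ _ => rfl)]
  simp
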